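-- pv_equiv track=rewrite | github.com/SantaJordan/blueprint-gtm-playbooks | evaluation/harness/metrics.py | _check_person_match
-- ===== SOURCE A (Python) =====
-- def _check_person_match(row) -> bool:
--     """Check if found contact matches expected person"""
--     contacts = row.get('contacts', [])
--     expected = row.get('expected_contacts', [])
--
--     if not contacts or not expected:
--         return False
--
--     # Match by LinkedIn URL or name
--     for contact in contacts:
--         for exp in expected:
--             if _person_matches(contact, exp):
--                 return True
--
--     return False
--
-- def _person_matches(contact: dict, expected: dict) -> bool:
--     """Check if two contact records match"""
--     # Match by LinkedIn URL (most reliable)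
--     c_li = (contact.get('linkedin_url') or '').lower().rstrip('/')
--     e_li = (expected.get('linkedin_url') or '').lower().rstrip('/')
--     if c_li and e_li and c_li == e_li:
--         return True
--
--     # Match by name (fuzzy)
--     c_name = (contact.get('name') or '').lower()
--     e_name = (expected.get('name') or '').lower()
--     if c_name and e_name:
--         # Simple containment check
--         if c_name in e_name or e_name in c_name:
--             return True
--
--     return False
-- ===== SOURCE B (Python) =====
-- def _norm_url(d):
--     return (d.get('linkedin_url') or '').lower().rstrip('/')
--
-- def _norm_name(d):
--     return (d.get('name') or '').lower()
--
-- def _check_person_match(row) -> bool: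
--     """Check if found contact matches expected person (two independent passes)."""
--     contacts = row.get('contacts', [])
--     expected = row.get('expected_contacts', [])
--
--     # Pass 1: LinkedIn-URL match via a set of normalized expected URLs.
--     url_set = {u for u in (_norm_url(e) for e in expected) if u}
--     if any(u and u in url_set for u in (_norm_url(c) for c in contacts)):
--         return True
--
--     # Pass 2: fuzzy name containment against the pre-normalized expected names.
--     e_names = [n for n in (_norm_name(e) for e in expected) if n]
--     return any(cn and any(cn in en or en in cn for en in e_names)
--                for cn in (_norm_name(c) for c in contacts))
-- ===== Notes on version B (the rewrite author's own statement) =====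
-- stated objective: alternative
-- what changed: B replaces A's single nested loop calling a combined per-pair predicate by two independent passes: first a set of normalized expected LinkedIn URLs probed once per contact, then a name-containment scan against a pre-normalized expected-name list; the empty-list guard disappears.
import Mathlib
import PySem

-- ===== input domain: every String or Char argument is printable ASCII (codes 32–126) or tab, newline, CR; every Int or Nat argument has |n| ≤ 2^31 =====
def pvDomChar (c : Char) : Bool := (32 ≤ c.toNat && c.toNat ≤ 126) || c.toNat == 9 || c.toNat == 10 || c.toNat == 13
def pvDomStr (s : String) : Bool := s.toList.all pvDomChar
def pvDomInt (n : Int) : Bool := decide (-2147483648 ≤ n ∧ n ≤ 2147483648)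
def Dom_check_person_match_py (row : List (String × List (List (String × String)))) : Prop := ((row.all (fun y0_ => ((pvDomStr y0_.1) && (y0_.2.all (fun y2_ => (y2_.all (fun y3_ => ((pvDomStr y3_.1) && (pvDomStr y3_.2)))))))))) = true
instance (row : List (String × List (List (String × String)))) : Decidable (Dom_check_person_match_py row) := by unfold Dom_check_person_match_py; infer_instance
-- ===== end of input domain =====

-- B factors A's nested loop over (contact, expected) pairs into two independent passes
-- (a URL-set probe, then a name-containment scan); alternative decomposition, same results.


-- shared helpers: dict lookups (first match in the association list) and the normalizers
-- (these are the same sub-expressions in both Pythons)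
def pvRowGet (row : List (String × List (List (String × String)))) (k : String) :
    List (List (String × String)) :=
  (((row.find? (fun p => p.1 == k)).map Prod.snd).getD [])

def pvGetD (d : List (String × String)) (k : String) : String :=
  (((d.find? (fun p => p.1 == k)).map Prod.snd).getD "")

-- exact port of str.rstrip('/'): drop trailing '/' characters
def pvRstripSlash (s : String) : String :=
  String.ofList ((s.toList.reverse.dropWhile (fun c => c == '/')).reverse)

def pvNormUrl (d : List (String × String)) : String :=
  pvRstripSlash (PySem.Str.lower (pvGetD d "linkedin_url"))

def pvNormName (d : List (String × String)) : String :=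
  PySem.Str.lower (pvGetD d "name")

-- ===== PORT A =====
def pvPersonMatches (contact expected : List (String × String)) : Bool :=
  let c_li := pvNormUrl contact
  let e_li := pvNormUrl expected
  if c_li ≠ "" ∧ e_li ≠ "" ∧ c_li = e_li then true
  else
    let c_name := pvNormName contact
    let e_name := pvNormName expected
    if c_name ≠ "" ∧ e_name ≠ "" ∧
        (PySem.Str.isIn c_name e_name || PySem.Str.isIn e_name c_name) = true then true
    else false

def check_person_match_py (row : List (String × List (List (String × String)))) : Bool :=
  let contacts := pvRowGet row "contacts"
  let expected := pvRowGet row "expected_contacts"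
  if contacts.isEmpty || expected.isEmpty then false
  else contacts.any (fun contact => expected.any (fun exp => pvPersonMatches contact exp))

-- ===== PORT B =====
def pvNormUrl? (d : List (String × String)) : Option String :=
  let u := pvNormUrl d
  if u = "" then none else some u

def pvNormName? (d : List (String × String)) : Option String :=
  let n := pvNormName d
  if n = "" then none else some n

def check_person_match_py_alt (row : List (String × List (List (String × String)))) : Bool :=
  let contacts := pvRowGet row "contacts"
  let expected := pvRowGet row "expected_contacts"
  let urlSet := PySem.Set.ofList (expected.filterMap pvNormUrl?)
  if contacts.any (fun c =>
      match pvNormUrl? c with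
      | some u => PySem.Set.contains urlSet u
      | none => false) then true
  else
    let eNames := expected.filterMap pvNormName?
    contacts.any (fun c =>
      match pvNormName? c with
      | some cn => eNames.any (fun en => PySem.Str.isIn cn en || PySem.Str.isIn en cn)
      | none => false)

-- ===== PRECONDITION & SPEC =====
def Spec_check_person_match_py (row : List (String × List (List (String × String)))) (out : Bool) : Prop := out = check_person_match_py_alt row
instance (row : List (String × List (List (String × String)))) (out : Bool) : Decidable (Spec_check_person_match_py row out) := by unfold Spec_check_person_match_py; infer_instance

-- ===== CLAIM (what is proved, stated in full; the proofs are below) =====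
def Claim_equal_check_person_match_py : Prop := ∀ (row : List (String × List (List (String × String)))), Dom_check_person_match_py row → Spec_check_person_match_py row (check_person_match_py row)

-- ===== LEMMAS AND PROOFS =====

-- the per-pair URL / name predicates A tests
def pvUrlP (c e : List (String × String)) : Bool :=
  decide (pvNormUrl c ≠ "" ∧ pvNormUrl e ≠ "" ∧ pvNormUrl c = pvNormUrl e)

def pvNameP (c e : List (String × String)) : Bool :=
  decide (pvNormName c ≠ "" ∧ pvNormName e ≠ "" ∧
    (PySem.Str.isIn (pvNormName c) (pvNormName e) || PySem.Str.isIn (pvNormName e) (pvNormName c)) = true)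

theorem personMatches_eq (c e : List (String × String)) :
    pvPersonMatches c e = (pvUrlP c e || pvNameP c e) := by
  unfold pvPersonMatches pvUrlP pvNameP
  by_cases h : pvNormUrl c ≠ "" ∧ pvNormUrl e ≠ "" ∧ pvNormUrl c = pvNormUrl e <;> simp [h]

theorem any_or_split {α : Type} (xs : List α) (p q : α → Bool) :
    xs.any (fun x => p x || q x) = (xs.any p || xs.any q) := by
  apply Bool.eq_iff_iff.mpr
  simp only [List.any_eq_true, Bool.or_eq_true]
  constructor
  · rintro ⟨x, hx, h | h⟩
    · exact Or.inl ⟨x, hx, h⟩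
    · exact Or.inr ⟨x, hx, h⟩
  · rintro (⟨x, hx, h⟩ | ⟨x, hx, h⟩)
    · exact ⟨x, hx, Or.inl h⟩
    · exact ⟨x, hx, Or.inr h⟩

theorem urlSide_eq (c : List (String × String)) (expected : List (List (String × String))) :
    expected.any (fun e => pvUrlP c e) =
      (match pvNormUrl? c with
       | some u => PySem.Set.contains (PySem.Set.ofList (expected.filterMap pvNormUrl?)) u
       | none => false) := by
  by_cases h : pvNormUrl c = ""
  · simp [pvNormUrl?, h, pvUrlP]
  · apply Bool.eq_iff_iff.mpr
    simp only [pvNormUrl?, h, reduceIte, List.any_eq_true, pvUrlP, decide_eq_true_eq]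
    rw [PySem.Set.contains_iff, PySem.Set.mem_ofList]
    simp only [List.mem_filterMap]
    constructor
    · rintro ⟨e, he, _, hne, heq⟩
      exact ⟨e, he, by simp [hne, heq]⟩
    · rintro ⟨e, he, hsome⟩
      split_ifs at hsome with hne
      injection hsome with hq
      exact ⟨e, he, h, hne, hq.symm⟩

theorem nameSide_eq (c : List (String × String)) (expected : List (List (String × String))) :
    expected.any (fun e => pvNameP c e) =
      (match pvNormName? c with
       | some cn => (expected.filterMap pvNormName?).any
           (fun en => PySem.Str.isIn cn en || PySem.Str.isIn en cn)
       | none => false) := by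
  by_cases h : pvNormName c = ""
  · simp [pvNormName?, h, pvNameP]
  · apply Bool.eq_iff_iff.mpr
    simp only [pvNormName?, h, reduceIte, List.any_eq_true, List.mem_filterMap, pvNameP,
      decide_eq_true_eq, Bool.or_eq_true]
    constructor
    · rintro ⟨e, he, _, hne, hin⟩
      refine ⟨pvNormName e, ⟨e, he, by simp [hne]⟩, ?_⟩
      simpa using hin
    · rintro ⟨en, ⟨e, he, hsome⟩, hin⟩
      split_ifs at hsome with hne
      injection hsome with hq
      rw [← hq] at hin
      exact ⟨e, he, h, hne, hin⟩

theorem guard_elim (contacts expected : List (List (String × String)))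
    (f : List (String × String) → List (String × String) → Bool) :
    (if contacts.isEmpty || expected.isEmpty then false
     else contacts.any (fun c => expected.any (fun e => f c e))) =
      contacts.any (fun c => expected.any (fun e => f c e)) := by
  by_cases hc : contacts.isEmpty
  · simp [List.isEmpty_iff.mp hc]
  · by_cases he : expected.isEmpty
    · simp [hc, List.isEmpty_iff.mp he]
    · simp [hc, he]

-- ===== VERDICT (by name: the statement is the Claim_ definition above) =====
theorem check_person_match_py_spec : Claim_equal_check_person_match_py := by
  intro row _
  show check_person_match_py row = check_person_match_py_alt row
  unfold check_person_match_py check_person_match_py_alt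
  rw [guard_elim]
  simp only [personMatches_eq, any_or_split, urlSide_eq, nameSide_eq]
  cases hX : (pvRowGet row "contacts").any (fun c =>
      match pvNormUrl? c with
      | some u => PySem.Set.contains
          (PySem.Set.ofList ((pvRowGet row "expected_contacts").filterMap pvNormUrl?)) u
      | none => false)
  · simp only [Bool.false_or, Bool.false_eq_true, if_false]
  · simp only [Bool.true_or, if_true]
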